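-- pv_equiv track=rewrite | github.com/meta-introspector/retro-sync | fixtures/scripts/hymn_self_decode.py | cl15_blade
-- ===== SOURCE A (Python) =====
-- def cl15_blade(intervals):
--     """Compute Cl(15) blade from interval sequence."""
--     mv = {0: 1}
--     for iv in intervals:
--         idx = abs(iv) % 15
--         blade = 1 << idx
--         new_mv = {}
--         for mask, coeff in mv.items():
--             result = mask ^ blade
--             sign = 1
--             for bit in range(idx):
--                 if mask & (1 << bit): sign *= -1
--             new_mv[result] = new_mv.get(result, 0) + coeff * sign
--         mv = {k: v for k, v in new_mv.items() if v != 0}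
--     return mv
-- ===== SOURCE B (Python) =====
-- def cl15_blade(intervals):
--     """Compute Cl(15) blade from interval sequence."""
--     # The multivector is always a single blade with coefficient +/-1, so track
--     # just the bit mask and the sign instead of a dict of coefficients.
--     mask, sign = 0, 1
--     for iv in intervals:
--         idx = abs(iv) % 15
--         if bin(mask & ((1 << idx) - 1)).count("1") % 2 == 1:
--             sign = -sign
--         mask ^= 1 << idx
--     return {mask: sign}
-- ===== Notes on version B (the rewrite author's own statement) =====
-- stated objective: simpler
-- what changed: The dict-of-coefficients multivector (with its inner items-loop, per-bit sign loop and zero-filtering) is replaced by two scalars: an integer bit mask and a sign flipped by the popcount parity of the mask's bits below the new index; the result is the single-entry dict {mask: sign}.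
import Mathlib
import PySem

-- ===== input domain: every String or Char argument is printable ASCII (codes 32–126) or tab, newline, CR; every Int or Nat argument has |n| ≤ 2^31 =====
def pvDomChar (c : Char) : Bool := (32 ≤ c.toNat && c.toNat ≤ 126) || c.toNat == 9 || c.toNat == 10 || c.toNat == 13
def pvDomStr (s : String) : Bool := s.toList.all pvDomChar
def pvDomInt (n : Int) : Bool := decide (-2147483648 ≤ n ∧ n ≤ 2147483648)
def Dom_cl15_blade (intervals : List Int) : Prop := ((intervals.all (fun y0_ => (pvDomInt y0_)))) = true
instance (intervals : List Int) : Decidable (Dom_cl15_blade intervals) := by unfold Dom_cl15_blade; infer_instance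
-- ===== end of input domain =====

-- B replaces A's dict-of-coefficients multivector (inner items-loop, per-bit sign loop,
-- zero filtering) by a single (mask, sign) pair, flipping the sign by the parity of the
-- set bits of the mask below the new index (simpler).


-- ===== PORT A =====
-- one iteration of A's outer loop: dict state, inner loop over items, per-bit sign loop, zero filter
def cl15_stepA (mv : PySem.Dict Int Int) (iv : Int) : PySem.Dict Int Int :=
  let idx := (PySem.Int.mod |iv| 15).toNat            -- idx = abs(iv) % 15 (nonneg)
  let blade : Int := ((2 ^ idx : Nat) : Int)          -- blade = 1 << idx
  let new_mv := mv.items.foldl (fun (new_mv : PySem.Dict Int Int) p =>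
    let mask := p.1
    let coeff := p.2
    let result := PySem.Int.bxor mask blade           -- result = mask ^ blade
    let sign := (List.range idx).foldl (fun sign bit =>
      if PySem.Int.band mask ((2 ^ bit : Nat) : Int) ≠ 0 then sign * -1 else sign) 1
    new_mv.insert result (new_mv.getD result 0 + coeff * sign)) PySem.Dict.empty
  PySem.Dict.mk (new_mv.items.filter (fun p => p.2 ≠ 0))   -- {k: v for k, v in … if v != 0}

def cl15_blade (intervals : List Int) : List (Int × Int) :=
  (intervals.foldl cl15_stepA (PySem.Dict.ofList [(0, 1)])).items

-- ===== PORT B =====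
-- parity of the number of set bits: bin(n).count("1") % 2 == 1
def cl15_popParity (n : Nat) : Bool :=
  if h : n = 0 then false
  else (decide (n % 2 = 1)).xor (cl15_popParity (n / 2))
decreasing_by exact Nat.div_lt_self (Nat.pos_of_ne_zero h) (by omega)

def cl15_stepB (st : Nat × Int) (iv : Int) : Nat × Int :=
  let idx := iv.natAbs % 15
  let sign := if cl15_popParity (st.1 &&& (2 ^ idx - 1)) then -st.2 else st.2
  (st.1 ^^^ 2 ^ idx, sign)

def cl15_blade_alt (intervals : List Int) : List (Int × Int) :=
  let st := intervals.foldl cl15_stepB (0, 1)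
  [((st.1 : Int), st.2)]

-- ===== PRECONDITION & SPEC =====
def Spec_cl15_blade (intervals : List Int) (out : List (Int × Int)) : Prop := out = cl15_blade_alt intervals
instance (intervals : List Int) (out : List (Int × Int)) : Decidable (Spec_cl15_blade intervals out) := by unfold Spec_cl15_blade; infer_instance

-- ===== CLAIM (what is proved, stated in full; the proofs are below) =====
def Claim_equal_cl15_blade : Prop := ∀ (intervals : List Int), Dom_cl15_blade intervals → Spec_cl15_blade intervals (cl15_blade intervals)

-- ===== LEMMAS AND PROOFS =====

theorem cl15_popParity_zero : cl15_popParity 0 = false := by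
  rw [cl15_popParity]; rfl

-- the recursion equation of cl15_popParity holds unconditionally (n = 0 gives false on both sides)
theorem cl15_popParity_eq (n : Nat) :
    cl15_popParity n = (decide (n % 2 = 1)).xor (cl15_popParity (n / 2)) := by
  by_cases hn : n = 0
  · subst hn; simp [cl15_popParity_zero]
  · rw [cl15_popParity]; simp [hn]

-- A's inner sign loop computes the parity of the low k bits of the mask
theorem cl15_sign_loop (k : Nat) : ∀ (mask : Nat) (s0 : Int),
    (List.range k).foldl (fun sign bit =>
      if PySem.Int.band ((mask : Nat) : Int) ((2 ^ bit : Nat) : Int) ≠ 0 then sign * -1 else sign) s0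
    = if cl15_popParity (mask % 2 ^ k) then -s0 else s0 := by
  induction k with
  | zero => intro mask s0; rw [Nat.pow_zero, Nat.mod_one, cl15_popParity_zero]; simp
  | succ k ih =>
    intro mask s0
    rw [List.range_succ_eq_map]
    simp only [List.foldl_cons, List.foldl_map]
    have hfun : (fun (s : Int) (b : Nat) =>
        if PySem.Int.band ((mask : Nat) : Int) ((2 ^ (b+1) : Nat) : Int) ≠ 0 then s * -1 else s)
        = (fun (s : Int) (b : Nat) =>
        if PySem.Int.band ((mask / 2 : Nat) : Int) ((2 ^ b : Nat) : Int) ≠ 0 then s * -1 else s) := by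
      funext s b
      have hc : (PySem.Int.band ((mask : Nat) : Int) ((2 ^ (b+1) : Nat) : Int) ≠ 0)
          ↔ (PySem.Int.band ((mask / 2 : Nat) : Int) ((2 ^ b : Nat) : Int) ≠ 0) := by
        rw [PySem.Int.band_natCast, PySem.Int.band_natCast]
        simp [Nat.and_two_pow, Nat.testBit_add_one]
      simp only [hc]
    rw [hfun, ih (mask / 2)]
    have e1 : mask % 2 ^ (k+1) % 2 = mask % 2 :=
      Nat.mod_mod_of_dvd _ (dvd_pow_self 2 (Nat.succ_ne_zero k))
    have e2 : mask % 2 ^ (k+1) / 2 = mask / 2 % 2 ^ k := by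
      rw [pow_succ']
      exact Nat.mod_mul_right_div_self mask 2 (2 ^ k)
    rw [cl15_popParity_eq (mask % 2 ^ (k+1)), e1, e2]
    have hc0 : (PySem.Int.band ((mask : Nat) : Int) ((2 ^ 0 : Nat) : Int) ≠ 0) ↔ mask % 2 = 1 := by
      rw [PySem.Int.band_natCast]
      simp [Nat.and_one_is_mod]
      omega
    simp only [hc0]
    rcases Nat.mod_two_eq_zero_or_one mask with h | h <;>
      rcases Bool.eq_false_or_eq_true (cl15_popParity (mask / 2 % 2 ^ k)) with hp | hp <;>
      simp [h, hp]

theorem cl15_abs_mod (iv : Int) : (PySem.Int.mod |iv| 15).toNat = iv.natAbs % 15 := by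
  rw [Int.abs_eq_natAbs, show ((15:Int)) = ((15:Nat):Int) from rfl,
    PySem.Int.mod_natCast, Int.toNat_natCast]

-- one step of A on a single-blade dict equals one step of B
theorem cl15_step_eq (mask : Nat) (sign : Int) (hs : sign = 1 ∨ sign = -1) (iv : Int) :
    cl15_stepA (PySem.Dict.mk [((mask : Int), sign)]) iv
    = PySem.Dict.mk [(((cl15_stepB (mask, sign) iv).1 : Int), (cl15_stepB (mask, sign) iv).2)] := by
  unfold cl15_stepA cl15_stepB
  simp only [cl15_abs_mod, Nat.and_two_pow_sub_one_eq_mod]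
  simp only [List.foldl_cons, List.foldl_nil]
  rw [cl15_sign_loop (iv.natAbs % 15) mask 1]
  rw [PySem.Int.bxor_natCast, PySem.Dict.getD_empty]
  rcases hs with h | h <;> subst h <;>
    rcases Bool.eq_false_or_eq_true (cl15_popParity (mask % 2 ^ (iv.natAbs % 15))) with hp | hp <;>
      simp [hp, PySem.Dict.empty, PySem.Dict.insert]

theorem cl15_stepB_sign (st : Nat × Int) (hs : st.2 = 1 ∨ st.2 = -1) (iv : Int) :
    (cl15_stepB st iv).2 = 1 ∨ (cl15_stepB st iv).2 = -1 := by
  unfold cl15_stepB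
  rcases hs with h | h <;> rw [show st.2 = _ from h] <;> dsimp only <;> split <;> simp

-- A's whole loop on a single-blade dict tracks B's (mask, sign) state
theorem cl15_loop_eq (l : List Int) : ∀ (mask : Nat) (sign : Int), (sign = 1 ∨ sign = -1) →
    l.foldl cl15_stepA (PySem.Dict.mk [((mask : Int), sign)])
    = PySem.Dict.mk [(((l.foldl cl15_stepB (mask, sign)).1 : Int), (l.foldl cl15_stepB (mask, sign)).2)] := by
  induction l with
  | nil => intro mask sign _; rfl
  | cons iv l ih =>
    intro mask sign hs
    rw [List.foldl_cons, List.foldl_cons, cl15_step_eq mask sign hs iv]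
    exact ih (cl15_stepB (mask, sign) iv).1 (cl15_stepB (mask, sign) iv).2
      (cl15_stepB_sign (mask, sign) hs iv)

-- ===== VERDICT (by name: the statement is the Claim_ definition above) =====
theorem cl15_blade_spec : Claim_equal_cl15_blade := by
  intro intervals _
  unfold Spec_cl15_blade cl15_blade cl15_blade_alt
  have h := cl15_loop_eq intervals 0 1 (Or.inl rfl)
  simp only [Nat.cast_zero] at h
  rw [show (PySem.Dict.ofList [((0:Int), (1:Int))]) = PySem.Dict.mk [((0:Int), 1)] from by decide, h]
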